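-- pv_equiv track=rewrite | github.com/AndreaBennett42/CODESMITH_IRS_RAG | hybrid_rag.py | window_cooccurrence_count
-- ===== SOURCE A (Python) =====
-- from typing import Dict, List, Optional, Set, Tuple
--
-- def window_cooccurrence_count(tokens: List[str], query_terms: Set[str], window_size: int = 12) -> int:
--     # Max number of distinct query terms observed in any sliding token window.
--     if not tokens or not query_terms:
--         return 0
--     best = 0
--     n = len(tokens)
--     for i in range(n):
--         window = set(tokens[i : min(n, i + window_size)])
--         c = len(window & query_terms)
--         if c > best:
--             best = c
--     return best
-- ===== SOURCE B (Python) =====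
-- def window_cooccurrence_count(tokens, query_terms, window_size=12):
--     # One pass: per-term occurrence counts over a sliding window plus a running distinct total.
--     if window_size <= 0:
--         return 0
--     counts = {}
--     distinct = 0
--     best = 0
--     for j, t in enumerate(tokens):
--         if t in query_terms:
--             c = counts.get(t, 0) + 1
--             counts[t] = c
--             if c == 1:
--                 distinct += 1
--         if j >= window_size:
--             u = tokens[j - window_size]
--             if u in query_terms:
--                 counts[u] -= 1
--                 if counts[u] == 0:
--                     distinct -= 1
--         if distinct > best:
--             best = distinct
--     return best
-- ===== Notes on version B (the rewrite author's own statement) =====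
-- stated objective: faster
-- what changed: Replaces the per-start rebuild of a window set and its intersection with the query set (O(n*w)) by one pass over the tokens that maintains a sliding-window frequency counter of query terms and a running distinct count (O(n)); nonpositive window sizes return 0 up front.
-- intended difference: When window_size < 0, len(tokens)+window_size >= 1 and some query term occurs in tokens[:-1], A's slice stop min(n, i+window_size) is negative and wraps around Python-style, so A returns the maximum over bogus wrapped windows (nonzero); B returns 0, the intended value since a nonpositive window contains no tokens. — e.g. on window_cooccurrence_count(["a", "b"], ["a"], -1): A returns 1, B returns 0
import Mathlib
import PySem

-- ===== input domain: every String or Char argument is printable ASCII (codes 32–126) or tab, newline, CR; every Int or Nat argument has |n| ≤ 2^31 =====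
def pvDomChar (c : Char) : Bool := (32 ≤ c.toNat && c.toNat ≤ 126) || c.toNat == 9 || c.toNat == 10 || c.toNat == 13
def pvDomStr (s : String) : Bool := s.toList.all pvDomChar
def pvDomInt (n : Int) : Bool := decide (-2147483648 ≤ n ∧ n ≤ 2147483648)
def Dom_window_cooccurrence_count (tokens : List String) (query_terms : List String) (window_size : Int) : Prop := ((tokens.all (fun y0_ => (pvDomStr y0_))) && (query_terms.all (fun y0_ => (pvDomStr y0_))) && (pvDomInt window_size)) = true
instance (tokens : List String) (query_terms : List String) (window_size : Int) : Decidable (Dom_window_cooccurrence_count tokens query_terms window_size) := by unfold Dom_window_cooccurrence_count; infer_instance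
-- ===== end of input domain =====

-- B replaces A's per-start window-set rebuild by a one-pass sliding-window frequency counter
-- with a running distinct count (objective: faster, O(n) instead of O(n·w)).

-- ===== PORT A =====
def window_cooccurrence_count (tokens : List String) (query_terms : List String) (window_size : Int) : Int :=
  if tokens = [] ∨ query_terms = [] then 0
  else
    let n : Int := tokens.length
    (PySem.List.pyRange 0 n 1).foldl (fun best i =>
      let window := PySem.Set.ofList (PySem.List.slice tokens (some i) (some (min n (i + window_size))))
      let c : Int := PySem.Set.len (PySem.Set.inter window query_terms)
      if c > best then c else best) 0

-- ===== PORT B =====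
-- loop body of Source B's single for-loop, as a named step function
def wccStep (query_terms : List String) (tokens : List String) (window_size : Int)
    (s : PySem.Dict String Int × Int × Int) (p : Int × String) : PySem.Dict String Int × Int × Int :=
  let counts := s.1
  let distinct := s.2.1
  let best := s.2.2
  let j := p.1
  let t := p.2
  let cd1 : PySem.Dict String Int × Int :=
    if PySem.Set.contains query_terms t then
      let c := counts.getD t 0 + 1
      (counts.insert t c, if c = 1 then distinct + 1 else distinct)
    else (counts, distinct)
  let cd2 : PySem.Dict String Int × Int :=
    if j ≥ window_size then
      let u := (PySem.List.pyGet? tokens (j - window_size)).getD ""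
      if PySem.Set.contains query_terms u then
        let counts2 := cd1.1.insert u (cd1.1.getD u 0 - 1)
        (counts2, if counts2.getD u 0 = 0 then cd1.2 - 1 else cd1.2)
      else cd1
    else cd1
  (cd2.1, cd2.2, if cd2.2 > best then cd2.2 else best)

def window_cooccurrence_count_alt (tokens : List String) (query_terms : List String) (window_size : Int) : Int :=
  if window_size ≤ 0 then 0
  else
    ((PySem.List.enumerate tokens).foldl (wccStep query_terms tokens window_size)
      (PySem.Dict.empty, 0, 0)).2.2

-- ===== PRECONDITION & SPEC =====
-- When window_size < 0, len(tokens)+window_size ≥ 1 and some query term occurs in tokens[:-1],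
-- A's slice stop min(n, i+window_size) is negative and wraps around Python-style, so A returns the
-- maximum over bogus wrapped windows (nonzero); B returns 0, the intended value since a
-- nonpositive window contains no tokens.
def D_window_cooccurrence_count (tokens : List String) (query_terms : List String) (window_size : Int) : Prop :=
  window_size < 0 ∧ 1 ≤ (tokens.length : Int) + window_size ∧
    (tokens.take (tokens.length - 1)).any (fun t => PySem.Set.contains query_terms t) = true
instance (tokens : List String) (query_terms : List String) (window_size : Int) : Decidable (D_window_cooccurrence_count tokens query_terms window_size) := by unfold D_window_cooccurrence_count; infer_instance

def Spec_window_cooccurrence_count (tokens : List String) (query_terms : List String) (window_size : Int) (out : Int) : Prop := ¬ D_window_cooccurrence_count tokens query_terms window_size → out = window_cooccurrence_count_alt tokens query_terms window_size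
instance (tokens : List String) (query_terms : List String) (window_size : Int) (out : Int) : Decidable (Spec_window_cooccurrence_count tokens query_terms window_size out) := by unfold Spec_window_cooccurrence_count; infer_instance

def pvDiffWitness_window_cooccurrence_count : List String × List String × Int := (["a", "b"], ["a"], -1)
def pvDiffWitnessOut_window_cooccurrence_count : Int × Int := (1, 0)

-- ===== CLAIM (what is proved, stated in full; the proofs are below) =====
def Claim_unchanged_window_cooccurrence_count : Prop := ∀ (tokens : List String) (query_terms : List String) (window_size : Int), Dom_window_cooccurrence_count tokens query_terms window_size → Spec_window_cooccurrence_count tokens query_terms window_size (window_cooccurrence_count tokens query_terms window_size)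
def Claim_changed_window_cooccurrence_count : Prop := Dom_window_cooccurrence_count (pvDiffWitness_window_cooccurrence_count.1) (pvDiffWitness_window_cooccurrence_count.2.1) (pvDiffWitness_window_cooccurrence_count.2.2) ∧ D_window_cooccurrence_count (pvDiffWitness_window_cooccurrence_count.1) (pvDiffWitness_window_cooccurrence_count.2.1) (pvDiffWitness_window_cooccurrence_count.2.2) ∧ window_cooccurrence_count (pvDiffWitness_window_cooccurrence_count.1) (pvDiffWitness_window_cooccurrence_count.2.1) (pvDiffWitness_window_cooccurrence_count.2.2) = pvDiffWitnessOut_window_cooccurrence_count.1 ∧ window_cooccurrence_count_alt (pvDiffWitness_window_cooccurrence_count.1) (pvDiffWitness_window_cooccurrence_count.2.1) (pvDiffWitness_window_cooccurrence_count.2.2) = pvDiffWitnessOut_window_cooccurrence_count.2 ∧ pvDiffWitnessOut_window_cooccurrence_count.1 ≠ pvDiffWitnessOut_window_cooccurrence_count.2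
def Claim_exact_window_cooccurrence_count : Prop := ∀ (tokens : List String) (query_terms : List String) (window_size : Int), Dom_window_cooccurrence_count tokens query_terms window_size → D_window_cooccurrence_count tokens query_terms window_size → window_cooccurrence_count tokens query_terms window_size ≠ window_cooccurrence_count_alt tokens query_terms window_size

-- ===== LEMMAS AND PROOFS =====

-- a contiguous segment tokens[a:b] (Nat bounds)
def seg (l : List String) (a b : Nat) : List String := (l.drop a).take (b - a)

-- number of distinct elements of l that are query terms
def qD (q l : List String) : Int :=
  (((PySem.Set.ofList l).filter (fun x => PySem.Set.contains q x)).length : Int)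

-- running maximum (with floor 0), as computed by both loops
def fmax (l : List Int) : Int := l.foldl (fun b x => if x > b then x else b) 0

theorem foldl_fmax_ge (l : List Int) (b0 : Int) : b0 ≤ l.foldl (fun b x => if x > b then x else b) b0 := by
  induction l generalizing b0 with
  | nil => simp
  | cons y ys ih =>
    simp only [List.foldl_cons]
    refine le_trans ?_ (ih _)
    split <;> omega

theorem le_fmax_foldl (l : List Int) (b0 x : Int) (hx : x ∈ l) :
    x ≤ l.foldl (fun b x => if x > b then x else b) b0 := by
  induction l generalizing b0 with
  | nil => simp at hx
  | cons y ys ih =>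
    simp only [List.foldl_cons]
    rcases List.mem_cons.mp hx with h | h
    · subst h
      refine le_trans ?_ (foldl_fmax_ge ys _)
      split <;> omega
    · exact ih _ h


theorem fmax_foldl_le (l : List Int) (b0 b : Int) (h0 : b0 ≤ b) (h : ∀ x ∈ l, x ≤ b) :
    l.foldl (fun b x => if x > b then x else b) b0 ≤ b := by
  induction l generalizing b0 with
  | nil => simpa using h0
  | cons y ys ih =>
    simp only [List.foldl_cons]
    have hy := h y (List.mem_cons_self)
    apply ih
    · split <;> omega
    · exact fun x hx => h x (List.mem_cons_of_mem _ hx)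

theorem fmax_nonneg (l : List Int) : 0 ≤ fmax l := foldl_fmax_ge l 0

theorem le_fmax (l : List Int) (x : Int) (hx : x ∈ l) : x ≤ fmax l := le_fmax_foldl l 0 x hx

theorem fmax_le (l : List Int) (b : Int) (h0 : 0 ≤ b) (h : ∀ x ∈ l, x ≤ b) : fmax l ≤ b :=
  fmax_foldl_le l 0 b h0 h

theorem fmax_append_singleton (l : List Int) (x : Int) :
    fmax (l ++ [x]) = if x > fmax l then x else fmax l := by
  simp [fmax, List.foldl_append]

theorem fmax_eq_fmax (l1 l2 : List Int)
    (h1 : ∀ x ∈ l1, ∃ y ∈ l2, x ≤ y) (h2 : ∀ x ∈ l2, ∃ y ∈ l1, x ≤ y) :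
    fmax l1 = fmax l2 := by
  apply le_antisymm
  · refine fmax_le _ _ (fmax_nonneg _) (fun x hx => ?_)
    obtain ⟨y, hy, hxy⟩ := h1 x hx
    exact le_trans hxy (le_fmax _ _ hy)
  · refine fmax_le _ _ (fmax_nonneg _) (fun x hx => ?_)
    obtain ⟨y, hy, hxy⟩ := h2 x hx
    exact le_trans hxy (le_fmax _ _ hy)

-- ---- qD lemmas ----

theorem card_filter_insert (s : Finset String) (P : String → Prop) [DecidablePred P] (a : String) :
    ((insert a s).filter P).card = (s.filter P).card + (if P a ∧ a ∉ s then 1 else 0) := by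
  rw [Finset.filter_insert]
  by_cases hp : P a
  · by_cases hm : a ∈ s
    · simp [hp, hm, Finset.insert_eq_self.mpr (Finset.mem_filter.mpr ⟨hm, hp⟩)]
    · have hnm : a ∉ s.filter P := fun hc => hm (Finset.mem_filter.mp hc).1
      simp [hp, hm, Finset.card_insert_of_notMem hnm]
  · simp [hp]

theorem qD_eq_card (q l : List String) :
    qD q l = ((l.toFinset.filter (fun x => PySem.Set.contains q x = true)).card : Int) := by
  have hnd : ((PySem.Set.ofList l).filter (fun x => PySem.Set.contains q x)).Nodup :=
    (PySem.Set.nodup_ofList l).filter _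
  rw [qD]
  congr 1
  rw [← List.toFinset_card_of_nodup hnd]
  congr 1
  ext x
  simp [PySem.Set.mem_ofList]

theorem qD_mono (q l1 l2 : List String) (h : l1 ⊆ l2) : qD q l1 ≤ qD q l2 := by
  rw [qD_eq_card, qD_eq_card]
  have hsub : l1.toFinset ⊆ l2.toFinset := by
    intro x hx
    rw [List.mem_toFinset] at *
    exact h hx
  exact_mod_cast Finset.card_le_card (Finset.filter_subset_filter _ hsub)

theorem qD_append_singleton (q l : List String) (t : String) :
    qD q (l ++ [t]) = qD q l + (if PySem.Set.contains q t = true ∧ t ∉ l then 1 else 0) := by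
  have hins : (l ++ [t]).toFinset = insert t l.toFinset := by
    ext x
    simp
  rw [qD_eq_card, qD_eq_card, hins, card_filter_insert]
  split_ifs with h1 h2 h2 <;> push_cast <;> simp_all

theorem qD_cons (q l : List String) (t : String) :
    qD q (t :: l) = qD q l + (if PySem.Set.contains q t = true ∧ t ∉ l then 1 else 0) := by
  have hins : (t :: l).toFinset = insert t l.toFinset := List.toFinset_cons
  rw [qD_eq_card, qD_eq_card, hins, card_filter_insert]
  split_ifs with h1 h2 h2 <;> push_cast <;> simp_all

theorem qD_eq_zero (q l : List String) (h : ∀ x ∈ l, PySem.Set.contains q x = false) :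
    qD q l = 0 := by
  have hnil : (PySem.Set.ofList l).filter (fun x => PySem.Set.contains q x) = [] := by
    rw [List.filter_eq_nil_iff]
    intro a ha
    have := h a ((PySem.Set.mem_ofList l a).mp ha)
    simp_all
  rw [qD, hnil]
  rfl

theorem qD_pos (q l : List String) (x : String) (hx : x ∈ l) (hq : PySem.Set.contains q x = true) :
    0 < qD q l := by
  have hmem : x ∈ (PySem.Set.ofList l).filter (fun x => PySem.Set.contains q x) :=
    List.mem_filter.mpr ⟨(PySem.Set.mem_ofList l x).mpr hx, hq⟩
  have hlen := List.length_pos_of_mem hmem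
  rw [qD]
  exact_mod_cast hlen

-- ---- seg lemmas ----

theorem seg_nil (l : List String) (a b : Nat) (h : b ≤ a) : seg l a b = [] := by
  simp [seg, Nat.sub_eq_zero_of_le h]

theorem seg_eq_drop_take (l : List String) (a b : Nat) : seg l a b = (l.take b).drop a := by
  simp [seg, List.drop_take]

theorem seg_subset (l : List String) (a a' b b' : Nat) (ha : a ≤ a') (hb : b' ≤ b) :
    seg l a' b' ⊆ seg l a b := by
  have e1 : a + (a' - a) = a' := by omega
  have e2 : b - a - (a' - a) = b - a' := by omega
  have e3 : min (b' - a') (b - a') = b' - a' := by omega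
  have heq : seg l a' b' = List.take (b' - a') (List.drop (a' - a) (seg l a b)) := by
    rw [seg, seg, List.drop_take, List.drop_drop, e1, e2, List.take_take, e3]
  rw [heq]
  exact fun x hx => List.drop_subset _ _ (List.take_subset _ _ hx)

theorem seg_subset_take (l : List String) (a b : Nat) : seg l a b ⊆ l.take b := by
  rw [seg_eq_drop_take]
  exact List.drop_subset _ _

theorem seg_succ_right (l : List String) (a b : Nat) (hab : a ≤ b) :
    seg l a (b + 1) = seg l a b ++ l[b]?.toList := by
  have e : b + 1 - a = (b - a) + 1 := by omega
  have e2 : a + (b - a) = b := by omega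
  rw [seg, seg, e, List.take_add_one, List.getElem?_drop, e2]

theorem seg_cons (l : List String) (a b : Nat) (hab : a < b) (ha : a < l.length) :
    seg l a b = l[a] :: seg l (a + 1) b := by
  have e : b - a = (b - (a + 1)) + 1 := by omega
  rw [seg, seg, List.drop_eq_getElem_cons ha, e, List.take_succ_cons]

theorem seg_mem (l : List String) (a b p : Nat) (h1 : a ≤ p) (h2 : p < b) (h3 : p < l.length) :
    l[p] ∈ seg l a b := by
  have hp : p - a < (seg l a b).length := by
    simp only [seg, List.length_take, List.length_drop]
    omega
  have hget : (seg l a b)[p - a] = l[p] := by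
    simp only [seg, List.getElem_take, List.getElem_drop]
    congr 1
    omega
  exact hget ▸ List.getElem_mem hp

-- ---- the B-loop invariant ----

-- the two halves of Source B's loop body, as proof-side abbreviations (definitionally
-- equal to the corresponding pieces of wccStep)
def addPhase (q : List String) (counts : PySem.Dict String Int) (distinct : Int) (t : String) :
    PySem.Dict String Int × Int :=
  if PySem.Set.contains q t then
    (counts.insert t (counts.getD t 0 + 1),
     if counts.getD t 0 + 1 = 1 then distinct + 1 else distinct)
  else (counts, distinct)

def removePhase (q : List String) (counts : PySem.Dict String Int) (distinct : Int) (u : String) :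
    PySem.Dict String Int × Int :=
  if PySem.Set.contains q u then
    (counts.insert u (counts.getD u 0 - 1),
     if (counts.insert u (counts.getD u 0 - 1)).getD u 0 = 0 then distinct - 1 else distinct)
  else (counts, distinct)

theorem addPhase_inv (q : List String) (counts : PySem.Dict String Int) (distinct : Int)
    (t : String) (W : List String)
    (hc : ∀ x, counts.getD x 0 = if PySem.Set.contains q x then ((W.count x : Int)) else 0)
    (hd : distinct = qD q W) :
    (∀ x, (addPhase q counts distinct t).1.getD x 0 =
        if PySem.Set.contains q x then (((W ++ [t]).count x : Int)) else 0)
    ∧ (addPhase q counts distinct t).2 = qD q (W ++ [t]) := by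
  by_cases hq : PySem.Set.contains q t = true
  · constructor
    · intro x
      simp only [addPhase, if_pos hq]
      rw [PySem.Dict.getD_insert]
      by_cases hx : x = t
      · subst hx
        rw [if_pos rfl, hc x, if_pos hq, if_pos hq]
        have : (W ++ [x]).count x = W.count x + 1 := by
          simp [List.count_append]
        rw [this]
        push_cast
        ring
      · rw [if_neg hx, hc x]
        have : (W ++ [t]).count x = W.count x := by
          simp [List.count_append, List.count_singleton]
          intro h
          exact absurd h.symm hx
        rw [this]
    · simp only [addPhase, if_pos hq]
      rw [qD_append_singleton]
      by_cases hw : t ∈ W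
      · have hpos := List.count_pos_iff.mpr hw
        have hcnt : ¬(counts.getD t 0 + 1 = 1) := by
          rw [hc t, if_pos hq]
          omega
        rw [if_neg hcnt, hd, if_neg (fun hcon => hcon.2 hw)]
        ring
      · have hcnt : counts.getD t 0 + 1 = 1 := by
          rw [hc t, if_pos hq, List.count_eq_zero.mpr hw]
          ring
        rw [if_pos hcnt, hd, if_pos ⟨hq, hw⟩]
  · constructor
    · intro x
      simp only [addPhase, if_neg hq]
      rw [hc x]
      by_cases hcx : PySem.Set.contains q x = true
      · rw [if_pos hcx, if_pos hcx]
        have hxt : ¬(t == x) := by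
          intro hbe
          exact hq ((beq_iff_eq.mp hbe) ▸ hcx)
        have : (W ++ [t]).count x = W.count x := by
          simp [List.count_append, List.count_singleton, hxt]
        rw [this]
      · rw [if_neg hcx, if_neg hcx]
    · simp only [addPhase, if_neg hq]
      rw [qD_append_singleton, hd, if_neg (fun hcon => hq hcon.1)]
      ring

theorem removePhase_inv (q : List String) (counts : PySem.Dict String Int) (distinct : Int)
    (u : String) (W' : List String)
    (hc : ∀ x, counts.getD x 0 = if PySem.Set.contains q x then (((u :: W').count x : Int)) else 0)
    (hd : distinct = qD q (u :: W')) :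
    (∀ x, (removePhase q counts distinct u).1.getD x 0 =
        if PySem.Set.contains q x then ((W'.count x : Int)) else 0)
    ∧ (removePhase q counts distinct u).2 = qD q W' := by
  have hcount : ∀ x : String, (u :: W').count x = W'.count x + if x = u then 1 else 0 := by
    intro x
    rw [List.count_cons]
    by_cases hx : x = u
    · simp [hx]
    · have : ¬(u == x) := by
        intro hbe
        exact hx (beq_iff_eq.mp hbe).symm
      simp [this, hx]
  by_cases hq : PySem.Set.contains q u = true
  · have hgu : (counts.insert u (counts.getD u 0 - 1)).getD u 0 = (W'.count u : Int) := by
      rw [PySem.Dict.getD_insert, if_pos rfl, hc u, if_pos hq, hcount u]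
      simp
    constructor
    · intro x
      simp only [removePhase, if_pos hq]
      rw [PySem.Dict.getD_insert]
      by_cases hx : x = u
      · subst hx
        rw [if_pos rfl, hc x, if_pos hq, hcount x, if_pos (rfl : x = x), if_pos hq]
        push_cast
        ring
      · rw [if_neg hx, hc x]
        by_cases hcx : PySem.Set.contains q x = true
        · rw [if_pos hcx, if_pos hcx, hcount x, if_neg hx]
          ring_nf
        · rw [if_neg hcx, if_neg hcx]
    · simp only [removePhase, if_pos hq]
      rw [hd, qD_cons]
      by_cases hw : u ∈ W'
      · have hpos := List.count_pos_iff.mpr hw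
        have hne : ¬((counts.insert u (counts.getD u 0 - 1)).getD u 0 = 0) := by
          rw [hgu]
          omega
        rw [if_neg hne, if_neg (fun hcon => hcon.2 hw)]
        ring
      · have hz : (counts.insert u (counts.getD u 0 - 1)).getD u 0 = 0 := by
          rw [hgu, List.count_eq_zero.mpr hw]
          rfl
        rw [if_pos hz, if_pos ⟨hq, hw⟩]
        ring
  · constructor
    · intro x
      simp only [removePhase, if_neg hq]
      rw [hc x]
      by_cases hcx : PySem.Set.contains q x = true
      · have hxu : ¬(x = u) := fun he => hq (he ▸ hcx)
        rw [if_pos hcx, if_pos hcx, hcount x, if_neg hxu]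
        ring_nf
      · rw [if_neg hcx, if_neg hcx]
    · simp only [removePhase, if_neg hq]
      rw [hd, qD_cons, if_neg (fun hcon => hq hcon.1)]
      ring

def WInv (q tokens : List String) (w' : Nat) (j : Nat) (s : PySem.Dict String Int × Int × Int) : Prop :=
  (∀ x : String, s.1.getD x 0 =
      if PySem.Set.contains q x then ((seg tokens (j - w') j).count x : Int) else 0)
  ∧ s.2.1 = qD q (seg tokens (j - w') j)
  ∧ s.2.2 = fmax ((List.range j).map (fun k => qD q (seg tokens (k + 1 - w') (k + 1))))

theorem wccStep_inv (q tokens : List String) (w : Int) (w' : Nat) (hw : w = (w' : Int)) (hw' : 0 < w')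
    (j : Nat) (hj : j < tokens.length) (s : PySem.Dict String Int × Int × Int)
    (h : WInv q tokens w' j s) :
    WInv q tokens w' (j + 1) (wccStep q tokens w s ((j : Int), tokens[j])) := by
  obtain ⟨hc, hd, hb⟩ := h
  have hMW : seg tokens (j - w') (j + 1) = seg tokens (j - w') j ++ [tokens[j]] := by
    have h1 := seg_succ_right tokens (j - w') j (by omega)
    rw [List.getElem?_eq_getElem hj] at h1
    simpa using h1
  have hstep : wccStep q tokens w s ((j : Int), tokens[j]) =
      ((if (j : Int) ≥ w then
          removePhase q (addPhase q s.1 s.2.1 tokens[j]).1 (addPhase q s.1 s.2.1 tokens[j]).2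
            ((PySem.List.pyGet? tokens ((j : Int) - w)).getD "")
        else addPhase q s.1 s.2.1 tokens[j]).1,
       (if (j : Int) ≥ w then
          removePhase q (addPhase q s.1 s.2.1 tokens[j]).1 (addPhase q s.1 s.2.1 tokens[j]).2
            ((PySem.List.pyGet? tokens ((j : Int) - w)).getD "")
        else addPhase q s.1 s.2.1 tokens[j]).2,
       if (if (j : Int) ≥ w then
          removePhase q (addPhase q s.1 s.2.1 tokens[j]).1 (addPhase q s.1 s.2.1 tokens[j]).2
            ((PySem.List.pyGet? tokens ((j : Int) - w)).getD "")
        else addPhase q s.1 s.2.1 tokens[j]).2 > s.2.2 then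
         (if (j : Int) ≥ w then
          removePhase q (addPhase q s.1 s.2.1 tokens[j]).1 (addPhase q s.1 s.2.1 tokens[j]).2
            ((PySem.List.pyGet? tokens ((j : Int) - w)).getD "")
        else addPhase q s.1 s.2.1 tokens[j]).2
       else s.2.2) := rfl
  rw [hstep]
  obtain ⟨hc1, hd1⟩ := addPhase_inv q s.1 s.2.1 tokens[j] (seg tokens (j - w') j) hc hd
  rw [← hMW] at hc1 hd1
  by_cases hjw : w' ≤ j
  · have hcond : ((j : Int) ≥ w) := by rw [hw]; exact_mod_cast hjw
    have hjwlen : j - w' < tokens.length := by omega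
    have hu : (PySem.List.pyGet? tokens ((j : Int) - w)).getD "" = tokens[j - w'] := by
      have e : (j : Int) - w = ((j - w' : Nat) : Int) := by rw [hw]; omega
      rw [e, PySem.List.pyGet?_natCast, List.getElem?_eq_getElem hjwlen]
      rfl
    have hM' : seg tokens (j - w') (j + 1) = tokens[j - w'] :: seg tokens (j + 1 - w') (j + 1) := by
      have h2 := seg_cons tokens (j - w') (j + 1) (by omega) hjwlen
      rw [show j - w' + 1 = j + 1 - w' from by omega] at h2
      exact h2
    rw [hM'] at hc1 hd1
    obtain ⟨hc2, hd2⟩ := removePhase_inv q _ _ tokens[j - w'] (seg tokens (j + 1 - w') (j + 1)) hc1 hd1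
    refine ⟨?_, ?_, ?_⟩
    · intro x
      simp only [if_pos hcond, hu]
      exact hc2 x
    · simp only [if_pos hcond, hu]
      exact hd2
    · simp only [if_pos hcond, hu]
      rw [hd2, hb, List.range_succ, List.map_append, List.map_cons, List.map_nil,
        fmax_append_singleton]
  · have hcond : ¬((j : Int) ≥ w) := by rw [hw]; omega
    have e0 : j + 1 - w' = j - w' := by omega
    refine ⟨?_, ?_, ?_⟩
    · intro x
      simp only [if_neg hcond]
      rw [e0]
      exact hc1 x
    · simp only [if_neg hcond]
      rw [e0]
      exact hd1
    · simp only [if_neg hcond]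
      rw [hd1, hb, List.range_succ, List.map_append, List.map_cons, List.map_nil,
        fmax_append_singleton, e0]

theorem wcc_fold (q tokens : List String) (w : Int) (w' : Nat) (hw : w = (w' : Int)) (hw' : 0 < w') :
    ∀ (ys : List String) (j : Nat) (s : PySem.Dict String Int × Int × Int),
      tokens.drop j = ys → j ≤ tokens.length → WInv q tokens w' j s →
      WInv q tokens w' tokens.length ((PySem.List.enumerate ys (j : Int)).foldl (wccStep q tokens w) s) := by
  intro ys
  induction ys with
  | nil =>
    intro j s hdrop hj hinv
    have hlen : tokens.length - j = 0 := by
      have := congrArg List.length hdrop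
      simpa using this
    have hje : j = tokens.length := by omega
    subst hje
    rw [PySem.List.enumerate_nil, List.foldl_nil]
    exact hinv
  | cons y ys ih =>
    intro j s hdrop hj hinv
    have hjlt : j < tokens.length := by
      by_contra hge
      rw [List.drop_eq_nil_of_le (by omega)] at hdrop
      simp at hdrop
    have hcons := List.drop_eq_getElem_cons hjlt (l := tokens)
    rw [hcons] at hdrop
    injection hdrop with h1 h2
    rw [PySem.List.enumerate_cons, List.foldl_cons]
    have hstep := wccStep_inv q tokens w w' hw hw' j hjlt s hinv
    rw [h1] at hstep
    have e : ((j : Int) + 1) = (((j + 1 : Nat)) : Int) := by push_cast; ring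
    rw [e]
    exact ih (j + 1) _ h2 (by omega) hstep

theorem alt_eq_fmax (tokens q : List String) (w : Int) (w' : Nat) (hw : w = (w' : Int)) (hw' : 0 < w') :
    window_cooccurrence_count_alt tokens q w =
      fmax ((List.range tokens.length).map (fun k => qD q (seg tokens (k + 1 - w') (k + 1)))) := by
  rw [window_cooccurrence_count_alt, if_neg (by omega)]
  have hseg0 : seg tokens (0 - w') 0 = [] := seg_nil _ _ _ (by omega)
  have hinit : WInv q tokens w' 0 (PySem.Dict.empty, 0, 0) := by
    refine ⟨?_, ?_, ?_⟩
    · intro x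
      rw [PySem.Dict.getD_empty, hseg0]
      simp
    · rw [hseg0]
      rfl
    · rfl
  have hfold := wcc_fold q tokens w w' hw hw' tokens 0 (PySem.Dict.empty, 0, 0) rfl (by omega) hinit
  exact hfold.2.2

-- ---- the A-side characterisation ----

theorem a_eq_fmax (tokens q : List String) (w : Int) (ht : tokens ≠ []) (hq : q ≠ []) :
    window_cooccurrence_count tokens q w =
      fmax ((PySem.List.pyRange 0 (tokens.length : Int) 1).map (fun i =>
        qD q (PySem.List.slice tokens (some i) (some (min (tokens.length : Int) (i + w)))))) := by
  rw [window_cooccurrence_count, if_neg (by simp [ht, hq])]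
  rw [fmax, List.foldl_map]
  rfl

theorem slice_eq_seg_pos (tokens : List String) (w : Int) (w' : Nat) (hw : w = (w' : Int)) (_hw' : 0 < w')
    (i' : Nat) (_hi : i' < tokens.length) :
    PySem.List.slice tokens (some (i' : Int)) (some (min (tokens.length : Int) ((i' : Int) + w))) =
      seg tokens i' (min tokens.length (i' + w')) := by
  have e : min ((tokens.length : Int)) ((i' : Int) + w) = ((min tokens.length (i' + w') : Nat) : Int) := by
    rw [hw]
    omega
  rw [e, PySem.List.slice_natCast]
  rfl

theorem slice_neg_stop (l : List String) (i' : Nat) (e : Int) (hin : i' ≤ l.length) (he : e < 0) :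
    PySem.List.slice l (some (i' : Int)) (some e) = seg l i' ((l.length : Int) + e).toNat := by
  have h1 : PySem.List.clampIdx l.length ((i' : Int)) = i' := by
    rw [PySem.List.clampIdx, if_neg (by omega : ¬((i' : Int) < 0))]
    rw [Int.toNat_natCast]
    omega
  have h2 : PySem.List.clampIdx l.length e = ((l.length : Int) + e).toNat := by
    rw [PySem.List.clampIdx, if_pos he]
    by_cases h3 : (l.length : Int) + e < 0
    · rw [if_pos h3]
      omega
    · rw [if_neg h3]
  unfold PySem.List.slice
  dsimp only
  rw [h1, h2]
  rfl

-- any window of A with a nonpositive window_size (outside D_) counts no query terms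
theorem a_window_zero (tokens q : List String) (w : Int) (hw0 : w ≤ 0)
    (hok : ¬ D_window_cooccurrence_count tokens q w) (i' : Nat) (hi : i' < tokens.length) :
    qD q (PySem.List.slice tokens (some (i' : Int)) (some (min (tokens.length : Int) ((i' : Int) + w)))) = 0 := by
  by_cases hiw : 0 ≤ (i' : Int) + w
  · have e : min ((tokens.length : Int)) ((i' : Int) + w) = ((((i' : Int) + w).toNat : Nat) : Int) := by
      omega
    rw [e, PySem.List.slice_natCast]
    have : List.take (((i' : Int) + w).toNat - i') (List.drop i' tokens) = seg tokens i' (((i' : Int) + w).toNat) := rfl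
    rw [this, seg_nil _ _ _ (by omega)]
    rfl
  · have e : min ((tokens.length : Int)) ((i' : Int) + w) = (i' : Int) + w := by omega
    rw [e, slice_neg_stop tokens i' ((i' : Int) + w) (by omega) (by omega)]
    by_cases hnw : 1 ≤ (tokens.length : Int) + w
    · have hany : ¬ ((tokens.take (tokens.length - 1)).any (fun t => PySem.Set.contains q t) = true) :=
        fun h3 => hok ⟨by omega, hnw, h3⟩
      apply qD_eq_zero
      intro x hx
      have hb1 : ((tokens.length : Int) + ((i' : Int) + w)).toNat ≤ tokens.length - 1 := by omega
      have hx2 : x ∈ tokens.take (tokens.length - 1) := by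
        have hsub := seg_subset_take tokens i' (((tokens.length : Int) + ((i' : Int) + w)).toNat)
        have hx3 := hsub hx
        rw [show List.take (((tokens.length : Int) + ((i' : Int) + w)).toNat) tokens
            = List.take (((tokens.length : Int) + ((i' : Int) + w)).toNat) (List.take (tokens.length - 1) tokens) from by
          rw [List.take_take, min_eq_left hb1]] at hx3
        exact List.take_subset _ _ hx3
      by_contra hcon
      exact hany (List.any_eq_true.mpr ⟨x, hx2, by simpa using hcon⟩)
    · rw [seg_nil _ _ _ (by omega)]
      rfl

-- ===== VERDICT (by name: the statement is the Claim_ definition above) =====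
theorem window_cooccurrence_count_spec : Claim_unchanged_window_cooccurrence_count := by
  intro tokens q w _hdom hnd
  show window_cooccurrence_count tokens q w = window_cooccurrence_count_alt tokens q w
  by_cases hwpos : 0 < w
  · -- positive window: the sliding-window pass computes the same maximum
    have hw' : 0 < w.toNat := by omega
    have hww : w = (w.toNat : Int) := by omega
    rw [alt_eq_fmax tokens q w w.toNat hww hw']
    by_cases ht : tokens = []
    · subst ht
      simp [window_cooccurrence_count, fmax]
    by_cases hqq : q = []
    · rw [window_cooccurrence_count, if_pos (Or.inr hqq)]
      refine le_antisymm (fmax_nonneg _) (fmax_le _ _ le_rfl ?_)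
      intro x hx
      obtain ⟨k, _, hxe⟩ := List.mem_map.mp hx
      rw [← hxe, hqq, qD_eq_zero]
      intro y _
      rfl
    · rw [a_eq_fmax tokens q w ht hqq]
      apply fmax_eq_fmax
      · intro x hx
        obtain ⟨i, hiR, hxe⟩ := List.mem_map.mp hx
        obtain ⟨hi0, hin⟩ := PySem.List.mem_pyRange_one.mp hiR
        have hi' : i = ((i.toNat : Nat) : Int) := by omega
        have hiltn : i.toNat < tokens.length := by omega
        rw [hi', slice_eq_seg_pos tokens w w.toNat hww hw' i.toNat hiltn] at hxe
        set b := min tokens.length (i.toNat + w.toNat) with hbdef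
        have hb1 : 1 ≤ b := by omega
        refine ⟨qD q (seg tokens (b - 1 + 1 - w.toNat) (b - 1 + 1)),
          List.mem_map.mpr ⟨b - 1, List.mem_range.mpr (by omega), rfl⟩, ?_⟩
        rw [← hxe, show b - 1 + 1 = b from by omega]
        exact qD_mono _ _ _ (seg_subset tokens (b - w.toNat) i.toNat b b (by omega) le_rfl)
      · intro x hx
        obtain ⟨k, hkR, hxe⟩ := List.mem_map.mp hx
        have hkn := List.mem_range.mp hkR
        have hi'n : k + 1 - w.toNat < tokens.length := by omega
        refine ⟨qD q (PySem.List.slice tokens (some ((k + 1 - w.toNat : Nat) : Int))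
            (some (min (tokens.length : Int) (((k + 1 - w.toNat : Nat) : Int) + w)))),
          List.mem_map.mpr ⟨((k + 1 - w.toNat : Nat) : Int),
            PySem.List.mem_pyRange_one.mpr ⟨by omega, by omega⟩, rfl⟩, ?_⟩
        rw [slice_eq_seg_pos tokens w w.toNat hww hw' (k + 1 - w.toNat) hi'n, ← hxe]
        exact qD_mono _ _ _ (seg_subset tokens (k + 1 - w.toNat) (k + 1 - w.toNat)
          (min tokens.length (k + 1 - w.toNat + w.toNat)) (k + 1) le_rfl (by omega))
  · -- nonpositive window: B returns 0 and (outside D_) every window of A counts 0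
    rw [window_cooccurrence_count_alt, if_pos (by omega)]
    by_cases ht : tokens = []
    · simp [window_cooccurrence_count, ht]
    by_cases hqq : q = []
    · simp [window_cooccurrence_count, hqq]
    rw [a_eq_fmax tokens q w ht hqq]
    apply le_antisymm _ (fmax_nonneg _)
    apply fmax_le _ _ le_rfl
    intro x hx
    obtain ⟨i, hiR, hxe⟩ := List.mem_map.mp hx
    obtain ⟨hi0, hin⟩ := PySem.List.mem_pyRange_one.mp hiR
    have hi' : i = ((i.toNat : Nat) : Int) := by omega
    rw [hi'] at hxe
    rw [← hxe, a_window_zero tokens q w (by omega) hnd i.toNat (by omega)]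

theorem window_cooccurrence_count_changed : Claim_changed_window_cooccurrence_count := by
  unfold Claim_changed_window_cooccurrence_count
  decide

theorem window_cooccurrence_count_tight : Claim_exact_window_cooccurrence_count := by
  intro tokens q w _hdom hD
  obtain ⟨hwneg, hnw, hany⟩ := hD
  have halt : window_cooccurrence_count_alt tokens q w = 0 := by
    rw [window_cooccurrence_count_alt, if_pos (by omega)]
  obtain ⟨x, hxmem, hxq⟩ := List.any_eq_true.mp hany
  obtain ⟨p, hp, hpe⟩ := List.getElem_of_mem hxmem
  have hplen : p < tokens.length - 1 := by
    rw [List.length_take] at hp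
    omega
  have hpn : p < tokens.length := by omega
  have hpx : tokens[p] = x := by
    rw [← hpe, List.getElem_take]
  have ht : tokens ≠ [] := List.ne_nil_of_length_pos (by omega)
  have hqq : q ≠ [] := by
    rintro rfl
    simp [PySem.Set.contains] at hxq
  rw [a_eq_fmax tokens q w ht hqq, halt]
  -- the wrapped window starting at i' contains position p, so A's maximum is positive
  set i' := ((p : Int) - tokens.length - w + 1).toNat with hi'def
  have hi'p : i' ≤ p := by omega
  have hi'w : (i' : Int) + w < 0 := by omega
  have hi'n : i' < tokens.length := by omega
  have hpb : (p : Int) < (tokens.length : Int) + ((i' : Int) + w) := by omega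
  have hwin : qD q (PySem.List.slice tokens (some (i' : Int))
      (some (min (tokens.length : Int) ((i' : Int) + w)))) > 0 := by
    rw [min_eq_right (by omega), slice_neg_stop tokens i' ((i' : Int) + w) (by omega) hi'w]
    refine qD_pos q _ tokens[p] (seg_mem tokens i' _ p hi'p (by omega) hpn) ?_
    rw [hpx]
    exact hxq
  have hle := le_fmax ((PySem.List.pyRange 0 (tokens.length : Int) 1).map (fun i =>
      qD q (PySem.List.slice tokens (some i) (some (min (tokens.length : Int) (i + w))))))
    (qD q (PySem.List.slice tokens (some (i' : Int)) (some (min (tokens.length : Int) ((i' : Int) + w)))))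
    (List.mem_map.mpr ⟨(i' : Int),
      (PySem.List.mem_pyRange_one (a := 0) (b := (tokens.length : Int)) (x := (i' : Int))).mpr
        ⟨by omega, by omega⟩, rfl⟩)
  omega
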